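-- pv_equiv track=rewrite | github.com/JustIsQi/supplierchainsgraph | oversea_study/demo.py | split_text_into_paragraphs
-- ===== SOURCE A (Python) =====
-- def split_text_into_paragraphs(text):
--     """
--     将长文本按 markdown 标题分割成段落
--     以 # 开头的为标题，两个标题之间为一个段落
--
--     Args:
--         text: 输入文本
--         max_length: 每个段落的最大字符数（暂时保留参数，未来可用于进一步分割）
--
--     Returns:
--         list: 段落列表，每个段落是一个字典 {"title": 标题, "content": 内容}
--     """
--     lines = text.split('\n')
--     paragraphs = []
--     current_title = ""
--     current_content = []
--
--     for line in lines:
--         # 检查是否是标题行（以一个或多个 # 开头）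
--         if line.strip().startswith('#'):
--             # 保存前一个段落
--             if current_title or current_content:
--                 content_text = '\n'.join(current_content).strip()
--                 if content_text:  # 只添加有内容的段落
--                     paragraphs.append({
--                         "title": current_title,
--                         "content": content_text
--                     })
--
--             # 开始新的段落
--             current_title = line.strip()
--             current_content = []
--         else:
--             # 累积当前段落的内容
--             current_content.append(line)
--
--     # 添加最后一个段落
--     if current_title or current_content:
--         content_text = '\n'.join(current_content).strip()
--         if content_text:
--             paragraphs.append({
--                 "title": current_title,
--                 "content": content_text
--             })
--
--     return paragraphs
-- ===== SOURCE B (Python) =====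
-- def _span_non_head(lines):
--     """Split lines at the first heading line: (non-heading prefix, rest)."""
--     for i, ln in enumerate(lines):
--         if ln.strip().startswith('#'):
--             return lines[:i], lines[i:]
--     return lines, []
--
--
-- def split_text_into_paragraphs(text):
--     lines = text.split('\n')
--     # First pass: split into (title, content_lines) segments.
--     pre, rest = _span_non_head(lines)
--     segments = [("", pre)]
--     while rest:  # rest[0] is always a heading line here
--         title = rest[0].strip()
--         body, rest = _span_non_head(rest[1:])
--         segments.append((title, body))
--     # Second pass: format, keeping only segments with non-empty content.
--     return [{"title": t, "content": c}
--             for t, c in ((t, '\n'.join(b).strip()) for t, b in segments)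
--             if c]
-- ===== Notes on version B (the rewrite author's own statement) =====
-- stated objective: simpler
-- what changed: Replaces A's incremental accumulate-and-flush loop (with its duplicated end-of-loop flush and title-or-content guard) by a two-pass split-then-format decomposition: first split the lines into (title, content_lines) segments at heading lines, then format each segment and drop those whose content strips to empty.
import Mathlib
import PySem

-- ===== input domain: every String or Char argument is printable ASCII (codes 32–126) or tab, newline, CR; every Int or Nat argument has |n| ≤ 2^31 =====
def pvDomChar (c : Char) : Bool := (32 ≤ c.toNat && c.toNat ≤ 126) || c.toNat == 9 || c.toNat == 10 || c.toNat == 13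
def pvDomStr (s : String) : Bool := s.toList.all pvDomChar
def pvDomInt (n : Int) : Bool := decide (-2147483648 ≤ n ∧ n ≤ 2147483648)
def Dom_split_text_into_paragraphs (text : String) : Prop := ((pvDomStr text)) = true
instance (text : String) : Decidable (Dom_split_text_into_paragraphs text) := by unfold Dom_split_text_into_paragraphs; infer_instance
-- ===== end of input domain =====

-- B replaces A's incremental accumulate-and-flush loop (with its duplicated end-of-loop flush)
-- by a two-pass split-then-format decomposition (objective: simpler; same value everywhere).

-- ===== PORT A =====
-- the paragraph-flush code A writes twice (inside the heading branch and after the loop)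
def pvFlushA (paras : List (List (String × String))) (title : String) (content : List String) :
    List (List (String × String)) :=
  if title ≠ "" ∨ content ≠ [] then
    let ct := PySem.Str.strip (PySem.Str.join "\n" content)
    if ct ≠ "" then paras ++ [[("title", title), ("content", ct)]] else paras
  else paras

-- the for-loop over lines, carrying (paragraphs, current_title, current_content)
def pvLoopA : List String → List (List (String × String)) → String → List String →
    List (List (String × String)) × String × List String
  | [], paras, title, content => (paras, title, content)
  | l :: rest, paras, title, content =>
    if PySem.Str.startswith (PySem.Str.strip l) "#" then
      pvLoopA rest (pvFlushA paras title content) (PySem.Str.strip l) []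
    else
      pvLoopA rest paras title (content ++ [l])

def split_text_into_paragraphs (text : String) : List (List (String × String)) :=
  let lines := (PySem.Str.split? text "\n").getD []
  let st := pvLoopA lines [] "" []
  pvFlushA st.1 st.2.1 st.2.2

-- ===== PORT B =====
def pvIsHead (l : String) : Bool := PySem.Str.startswith (PySem.Str.strip l) "#"

-- _span_non_head: (non-heading prefix, rest from the first heading on)
def pvSpan (lines : List String) : List String × List String :=
  (lines.takeWhile (fun l => !pvIsHead l), lines.dropWhile (fun l => !pvIsHead l))

-- the while-loop of B: rest always starts with a heading line
def pvSegs : List String → List (String × List String)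
  | [] => []
  | h :: rest =>
    let p := pvSpan rest
    (PySem.Str.strip h, p.1) :: pvSegs p.2
termination_by lines => lines.length
decreasing_by
  simp only [pvSpan, List.length_cons]
  exact Nat.lt_succ_of_le (List.length_dropWhile_le _ rest)

def split_text_into_paragraphs_alt (text : String) : List (List (String × String)) :=
  let lines := (PySem.Str.split? text "\n").getD []
  let p := pvSpan lines
  let segments := ("", p.1) :: pvSegs p.2
  segments.filterMap (fun s =>
    let c := PySem.Str.strip (PySem.Str.join "\n" s.2)
    if c ≠ "" then some [("title", s.1), ("content", c)] else none)

-- ===== PRECONDITION & SPEC =====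
def Spec_split_text_into_paragraphs (text : String) (out : List (List (String × String))) : Prop := out = split_text_into_paragraphs_alt text
instance (text : String) (out : List (List (String × String))) : Decidable (Spec_split_text_into_paragraphs text out) := by unfold Spec_split_text_into_paragraphs; infer_instance

-- ===== CLAIM (what is proved, stated in full; the proofs are below) =====
def Claim_equal_split_text_into_paragraphs : Prop := ∀ (text : String), Dom_split_text_into_paragraphs text → Spec_split_text_into_paragraphs text (split_text_into_paragraphs text)

-- ===== LEMMAS AND PROOFS =====

-- B's formatter of one segment, as a list (empty when the content strips to "")
def pvFmt (t : String) (b : List String) : List (List (String × String)) :=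
  let c := PySem.Str.strip (PySem.Str.join "\n" b)
  if c ≠ "" then [[("title", t), ("content", c)]] else []

lemma pvFlushA_eq (paras : List (List (String × String))) (t : String) (b : List String) :
    pvFlushA paras t b = paras ++ pvFmt t b := by
  by_cases hc : PySem.Str.strip (PySem.Str.join "\n" b) = ""
  · by_cases h : t ≠ "" ∨ b ≠ []
    · simp [pvFlushA, pvFmt, h, hc]
    · simp [pvFlushA, pvFmt, h, hc]
  · by_cases h : t ≠ "" ∨ b ≠ []
    · simp [pvFlushA, pvFmt, h, hc]
    · push Not at h
      obtain ⟨ht, hb⟩ := h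
      subst hb
      exact absurd (by decide) hc

lemma pvFilterMap_fmt (segs : List (String × List String)) :
    segs.filterMap (fun s =>
      let c := PySem.Str.strip (PySem.Str.join "\n" s.2)
      if c ≠ "" then some [("title", s.1), ("content", c)] else none)
      = segs.flatMap (fun s => pvFmt s.1 s.2) := by
  induction segs with
  | nil => rfl
  | cons s rest ih =>
    rw [List.filterMap_cons, List.flatMap_cons, ← ih]
    by_cases h : PySem.Str.strip (PySem.Str.join "\n" s.2) = ""
    · simp [pvFmt, h]
    · simp [pvFmt, h]

-- main invariant: running A's loop from any state and flushing equals the already-emitted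
-- paragraphs, the pending segment extended by the non-heading prefix, then B's segments
lemma pvLoop_eq (lines : List String) (paras : List (List (String × String)))
    (title : String) (content : List String) :
    (let st := pvLoopA lines paras title content; pvFlushA st.1 st.2.1 st.2.2)
      = paras ++ pvFmt title (content ++ lines.takeWhile (fun l => !pvIsHead l))
        ++ (pvSegs (lines.dropWhile (fun l => !pvIsHead l))).flatMap (fun s => pvFmt s.1 s.2) := by
  induction lines generalizing paras title content with
  | nil =>
    simp only [List.takeWhile_nil, List.dropWhile_nil, List.append_nil]
    rw [show pvSegs [] = [] by simp only [pvSegs]]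
    simp [pvLoopA, pvFlushA_eq]
  | cons l rest ih =>
    by_cases h : pvIsHead l = true
    · have hb : (!pvIsHead l) = false := by simp [h]
      have hraw : PySem.Str.startswith (PySem.Str.strip l) "#" = true := h
      simp only [pvLoopA]
      rw [if_pos hraw, ih]
      rw [List.takeWhile_cons, List.dropWhile_cons, hb]
      simp only [Bool.false_eq_true, if_false, List.append_nil]
      simp only [pvSegs, pvSpan, List.flatMap_cons, pvFlushA_eq, List.nil_append, List.append_assoc]
    · have hb : (!pvIsHead l) = true := by simp [h]
      have hraw : ¬ PySem.Str.startswith (PySem.Str.strip l) "#" = true := h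
      simp only [pvLoopA]
      rw [if_neg hraw, ih]
      rw [List.takeWhile_cons, List.dropWhile_cons, hb]
      simp [List.append_assoc]

-- ===== VERDICT (by name: the statement is the Claim_ definition above) =====
theorem split_text_into_paragraphs_spec : Claim_equal_split_text_into_paragraphs := by
  intro text _
  unfold Spec_split_text_into_paragraphs split_text_into_paragraphs split_text_into_paragraphs_alt
  rw [pvFilterMap_fmt]
  have := pvLoop_eq ((PySem.Str.split? text "\n").getD []) [] "" []
  simp only [] at this
  rw [this]
  simp [pvSpan, pvFmt]
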